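-- pv_equiv track=rewrite | github.com/gabe-rbo/pySurgery | pysurgery/core/homology_generators.py | _all_simplices_by_dim
-- ===== SOURCE A (Python) =====
-- import itertools
-- from typing import TYPE_CHECKING, Dict, Iterable, List, Literal, Optional, Tuple
--
-- def _all_simplices_by_dim(
--     simplices: Iterable[Tuple[int, ...]],
-- ) -> dict[int, list[tuple[int, ...]]]:
--     """Build simplicial closure grouped by dimension from input simplices.
--
--     Args:
--         simplices (Iterable[Tuple[int, ...]]): Input simplices.
--
--     Returns:
--         dict[int, list[tuple[int, ...]]]: Simplices grouped by dimension.
--     """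
--     by_dim_set: dict[int, set[tuple[int, ...]]] = {}
--     for s in simplices:
--         t = tuple(sorted(int(x) for x in s))
--         if len(t) == 0:
--             continue
--         # Work with the simplicial closure so boundaries are represented on all faces.
--         for r in range(1, len(t) + 1):
--             d = r - 1
--             if d not in by_dim_set:
--                 by_dim_set[d] = set()
--             for face in itertools.combinations(t, r):
--                 by_dim_set[d].add(tuple(face))
--
--     return {d: sorted(list(faces)) for d, faces in by_dim_set.items()}
-- ===== SOURCE B (Python) =====
-- def _all_simplices_by_dim(simplices):
--     """Simplicial closure grouped by dimension, computed by boundary peeling: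
--     each new face spawns its codimension-1 faces (delete one vertex at a time),
--     recursing only on faces not seen before, so shared faces are processed once."""
--     by_dim = {}
--
--     def peel(face):
--         d = len(face) - 2
--         bucket = by_dim.setdefault(d, set())
--         for i in range(len(face)):
--             sub = face[:i] + face[i + 1:]
--             if sub not in bucket:
--                 bucket.add(sub)
--                 if len(sub) > 1:
--                     peel(sub)
--
--     for s in simplices:
--         t = tuple(sorted(int(x) for x in s))
--         if not t:
--             continue
--         top = by_dim.setdefault(len(t) - 1, set())
--         if t not in top:
--             top.add(t)
--             if len(t) > 1:
--                 peel(t)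
--
--     return {d: sorted(by_dim[d]) for d in sorted(by_dim)}
-- ===== Notes on version B (the rewrite author's own statement) =====
-- stated objective: alternative
-- what changed: A enumerates, for every input simplex, all r-combinations of its sorted vertex tuple rank by rank; B computes the simplicial closure top-down by boundary peeling - each new face spawns its codimension-1 faces by deleting one vertex at a time and recurses only on faces not already recorded, so faces shared between simplices are expanded once.
import Mathlib
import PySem

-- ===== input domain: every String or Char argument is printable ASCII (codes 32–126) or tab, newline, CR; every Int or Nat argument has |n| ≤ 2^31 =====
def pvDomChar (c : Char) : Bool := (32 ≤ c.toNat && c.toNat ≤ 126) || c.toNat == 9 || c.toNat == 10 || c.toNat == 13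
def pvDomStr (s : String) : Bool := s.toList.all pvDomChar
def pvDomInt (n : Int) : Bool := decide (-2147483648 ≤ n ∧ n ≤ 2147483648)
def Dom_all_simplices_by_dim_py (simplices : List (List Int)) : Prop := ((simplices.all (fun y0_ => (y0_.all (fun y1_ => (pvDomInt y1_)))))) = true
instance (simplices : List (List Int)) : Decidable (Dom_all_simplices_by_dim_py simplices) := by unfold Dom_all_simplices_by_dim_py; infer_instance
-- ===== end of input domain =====

-- B replaces A's per-simplex rank-by-rank enumeration of all combinations with a worklist-style
-- boundary-peeling recursion (delete one vertex at a time, recursing only on faces not seen before),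
-- so faces shared between simplices are expanded once; same dict/set normalization and sorted output.

-- ===== PORT A =====
def all_simplices_by_dim_py (simplices : List (List Int)) : List (Int × List (List Int)) :=
  let byDimSet : PySem.Dict Int (PySem.Set (List Int)) :=
    simplices.foldl
      (fun acc s =>
        let t := PySem.List.sorted s (fun x => x) false
        if t.length = 0 then acc
        else
          (PySem.List.pyRange 1 ((t.length : Int) + 1) 1).foldl
            (fun acc r =>
              let d := r - 1
              let acc := if acc.contains d then acc else acc.insert d PySem.Set.empty
              -- r ∈ range(1, len(t)+1) is a positive int, so r.toNat is exact
              (PySem.List.combinations t r.toNat).foldl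
                (fun acc face => acc.modify d PySem.Set.empty (fun b => PySem.Set.add b face))
                acc)
            acc)
      PySem.Dict.empty
  byDimSet.items.map (fun p => (p.1, PySem.List.sorted p.2 (fun x => x) false))

-- ===== PORT B =====
-- recursive boundary peeling: from `face`, delete each vertex in turn (face[:i] + face[i+1:],
-- exact as take/drop since i ∈ range(len(face)) is a natural index), recursing on unseen faces
def pvPeel (face : List Int) (byDim : PySem.Dict Int (PySem.Set (List Int))) :
    PySem.Dict Int (PySem.Set (List Int)) :=
  let d : Int := (face.length : Int) - 2
  let byDim := byDim.setdefault d PySem.Set.empty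
  (List.range face.length).attach.foldl
    (fun st i =>
      let sub := face.take i.1 ++ face.drop (i.1 + 1)
      if PySem.Set.contains (st.getD d PySem.Set.empty) sub then st
      else
        let st := st.modify d PySem.Set.empty (fun b => PySem.Set.add b sub)
        if 1 < sub.length then pvPeel sub st else st)
    byDim
termination_by face.length
decreasing_by
  have hi : i.1 < face.length := List.mem_range.mp i.2
  simp [List.length_take, List.length_drop]
  omega

def all_simplices_by_dim_py_alt (simplices : List (List Int)) : List (Int × List (List Int)) :=
  let byDim : PySem.Dict Int (PySem.Set (List Int)) :=
    simplices.foldl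
      (fun byDim s =>
        let t := PySem.List.sorted s (fun x => x) false
        if t = [] then byDim
        else
          let d : Int := (t.length : Int) - 1
          let byDim := byDim.setdefault d PySem.Set.empty
          if PySem.Set.contains (byDim.getD d PySem.Set.empty) t then byDim
          else
            let byDim := byDim.modify d PySem.Set.empty (fun b => PySem.Set.add b t)
            if 1 < t.length then pvPeel t byDim else byDim)
      PySem.Dict.empty
  (PySem.List.sorted byDim.keys (fun x => x) false).map
    (fun d => (d, PySem.List.sorted (byDim.getD d PySem.Set.empty) (fun x => x) false))

-- ===== PRECONDITION & SPEC =====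
def Spec_all_simplices_by_dim_py (simplices : List (List Int)) (out : List (Int × List (List Int))) : Prop := out = all_simplices_by_dim_py_alt simplices
instance (simplices : List (List Int)) (out : List (Int × List (List Int))) : Decidable (Spec_all_simplices_by_dim_py simplices out) := by unfold Spec_all_simplices_by_dim_py; infer_instance

-- ===== CLAIM (what is proved, stated in full; the proofs are below) =====
def Claim_equal_all_simplices_by_dim_py : Prop := ∀ (simplices : List (List Int)), Dom_all_simplices_by_dim_py simplices → Spec_all_simplices_by_dim_py simplices (all_simplices_by_dim_py simplices)

-- ===== LEMMAS AND PROOFS =====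

-- Abbreviations used only by the proofs
def pvB (st : PySem.Dict Int (PySem.Set (List Int))) (d : Int) : PySem.Set (List Int) :=
  st.getD d PySem.Set.empty

def pvNorm (s : List Int) : List Int := PySem.List.sorted s (fun x => x) false

def pvCl (xs : List (List Int)) (d : Int) (u : List Int) : Prop :=
  u ≠ [] ∧ d = (u.length : Int) - 1 ∧ ∃ s ∈ xs, u.Sublist (pvNorm s)

def pvMaxFrom (M : Nat) (xs : List (List Int)) : Nat :=
  xs.foldl (fun m s => max m s.length) M

def pvRangeInt (n : Nat) : List Int := (List.range n).map (fun k : Nat => (k : Int))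

def pvWK (st : PySem.Dict Int (PySem.Set (List Int))) : Prop :=
  ∀ d u, u ∈ pvB st d → u ≠ [] ∧ d = (u.length : Int) - 1

def pvClosedX (st : PySem.Dict Int (PySem.Set (List Int))) (E : List (List Int)) : Prop :=
  ∀ d u, u ∈ pvB st d → u ∉ E → ∀ v, v.Sublist u → v ≠ [] → v ∈ pvB st ((v.length : Int) - 1)

-- small generic facts
lemma pvRangeInt_succ (n : Nat) : pvRangeInt (n + 1) = pvRangeInt n ++ [(n : Int)] := by
  simp [pvRangeInt, List.range_succ]

lemma mem_pvRangeInt (n : Nat) (d : Int) : d ∈ pvRangeInt n ↔ 0 ≤ d ∧ d < (n : Int) := by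
  simp [pvRangeInt]
  constructor
  · rintro ⟨k, hk, rfl⟩; omega
  · intro h; exact ⟨d.toNat, by omega, by omega⟩

lemma nodup_pvRangeInt (n : Nat) : (pvRangeInt n).Nodup := by
  unfold pvRangeInt
  refine (List.nodup_range (n := n)).map ?_
  intro a b h; simpa using h

lemma pairwise_pvRangeInt (n : Nat) : (pvRangeInt n).Pairwise (fun a b : Int => a < b) := by
  unfold pvRangeInt
  refine List.Pairwise.map _ ?_ (List.pairwise_lt_range (n := n))
  intro a b h; exact_mod_cast h

lemma pv_sublist_eraseIdx {u l : List Int} (h : u.Sublist l) (hlt : u.length < l.length) :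
    ∃ i, i < l.length ∧ u.Sublist (l.eraseIdx i) := by
  induction h with
  | slnil => simp at hlt
  | @cons l₁ l₂ a h ih =>
      exact ⟨0, by simp, by simpa using h⟩
  | @cons₂ l₁ l₂ a h ih =>
      obtain ⟨i, hi, hs⟩ := ih (by simpa using hlt)
      exact ⟨i + 1, by simpa using hi, by simpa using hs.cons₂ a⟩

lemma pv_sublist_singleton {v : List Int} {a : Int} (h : v.Sublist [a]) (hne : v ≠ []) :
    v = [a] := by
  rcases List.sublist_singleton.mp h with h' | h' <;> simp_all

lemma pv_lt_maxFrom (xs : List (List Int)) : ∀ (M k : Nat),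
    (k < pvMaxFrom M xs ↔ k < M ∨ ∃ s ∈ xs, k < s.length) := by
  induction xs with
  | nil => intro M k; simp [pvMaxFrom]
  | cons s xs ih =>
      intro M k
      have : pvMaxFrom M (s :: xs) = pvMaxFrom (max M s.length) xs := rfl
      rw [this, ih]
      constructor
      · rintro (h | h)
        · rcases lt_max_iff.mp h with h | h
          · exact Or.inl h
          · exact Or.inr ⟨s, by simp, h⟩
        · obtain ⟨t, ht, hk⟩ := h; exact Or.inr ⟨t, by simp [ht], hk⟩
      · rintro (h | ⟨t, ht, hk⟩)
        · exact Or.inl (lt_max_iff.mpr (Or.inl h))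
        · rcases List.mem_cons.mp ht with rfl | ht
          · exact Or.inl (lt_max_iff.mpr (Or.inr hk))
          · exact Or.inr ⟨t, ht, hk⟩

-- ---------- A side ----------
def pvRankA (t : List Int) (acc : PySem.Dict Int (PySem.Set (List Int))) (r : Int) :
    PySem.Dict Int (PySem.Set (List Int)) :=
  let d := r - 1
  let acc := if acc.contains d then acc else acc.insert d PySem.Set.empty
  (PySem.List.combinations t r.toNat).foldl
    (fun acc face => acc.modify d PySem.Set.empty (fun b => PySem.Set.add b face)) acc

def pvStepA (acc : PySem.Dict Int (PySem.Set (List Int))) (s : List Int) :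
    PySem.Dict Int (PySem.Set (List Int)) :=
  let t := PySem.List.sorted s (fun x => x) false
  if t.length = 0 then acc
  else (PySem.List.pyRange 1 ((t.length : Int) + 1) 1).foldl (pvRankA t) acc

lemma portA_eq (xs : List (List Int)) :
    all_simplices_by_dim_py xs =
      (xs.foldl pvStepA PySem.Dict.empty).items.map
        (fun p => (p.1, PySem.List.sorted p.2 (fun x => x) false)) := rfl

lemma pvPyRange_one (L : Nat) :
    PySem.List.pyRange 1 ((L : Int) + 1) 1 = (List.range L).map (fun k : Nat => (k : Int) + 1) := by
  induction L with
  | zero => rfl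
  | succ n ih =>
      have h1 : (((n + 1 : Nat) : Int) + 1) = ((n : Int) + 1) + 1 := by push_cast; ring
      rw [h1, PySem.List.pyRange_one_succ_right (by omega), List.range_succ, List.map_append, ih]
      simp

lemma pvCombosFold (fs : List (List Int)) : ∀ (st : PySem.Dict Int (PySem.Set (List Int))) (d : Int),
    st.contains d = true →
    (fs.foldl (fun acc face => acc.modify d PySem.Set.empty (fun b => PySem.Set.add b face)) st).keys = st.keys ∧
    (∀ d' u, u ∈ pvB (fs.foldl (fun acc face => acc.modify d PySem.Set.empty (fun b => PySem.Set.add b face)) st) d' ↔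
      u ∈ pvB st d' ∨ (d' = d ∧ u ∈ fs)) ∧
    ((∀ d', (pvB st d').Nodup) → ∀ d',
      (pvB (fs.foldl (fun acc face => acc.modify d PySem.Set.empty (fun b => PySem.Set.add b face)) st) d').Nodup) := by
  induction fs with
  | nil => intro st d h; exact ⟨rfl, by simp, fun hn => hn⟩
  | cons f fs ih =>
      intro st d hcont
      simp only [List.foldl_cons]
      have hc1 : (st.modify d PySem.Set.empty (fun b => PySem.Set.add b f)).contains d = true := by
        simp [PySem.Dict.contains_modify]
      have hkeys1 : (st.modify d PySem.Set.empty (fun b => PySem.Set.add b f)).keys = st.keys := by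
        rw [PySem.Dict.keys_modify, PySem.Dict.keys_insert_of_contains _ _ hcont]
      have hB1 : ∀ d', pvB (st.modify d PySem.Set.empty (fun b => PySem.Set.add b f)) d' =
          if d' = d then (pvB st d).add f else pvB st d' := by
        intro d'; simp [pvB, PySem.Dict.getD_modify]
      obtain ⟨hk, hm, hnd⟩ := ih _ d hc1
      refine ⟨hk.trans hkeys1, ?_, ?_⟩
      · intro d' u
        rw [hm d' u, hB1 d']
        by_cases hdd : d' = d
        · subst hdd; simp [PySem.Set.mem_add]; tauto
        · simp [hdd]
      · intro hbn d'
        refine hnd (fun d'' => ?_) d'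
        rw [hB1 d'']
        by_cases hdd : d'' = d
        · rw [hdd, if_pos rfl]; exact PySem.Set.nodup_add _ _ (hbn d)
        · rw [if_neg hdd]; exact hbn d''

lemma pvRankA_spec (t : List Int) (n : Nat) (st : PySem.Dict Int (PySem.Set (List Int))) (M : Nat)
    (hM : n ≤ M) (hk : st.keys = pvRangeInt M) (hn : ∀ d, (pvB st d).Nodup) :
    (pvRankA t st ((n : Int) + 1)).keys = pvRangeInt (max M (n + 1)) ∧
    (∀ d, (pvB (pvRankA t st ((n : Int) + 1)) d).Nodup) ∧
    (∀ d u, u ∈ pvB (pvRankA t st ((n : Int) + 1)) d ↔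
      u ∈ pvB st d ∨ (u.Sublist t ∧ u.length = n + 1 ∧ d = (n : Int))) := by
  have hd : ((n : Int) + 1) - 1 = (n : Int) := by ring
  have htn : ((n : Int) + 1).toNat = n + 1 := by omega
  unfold pvRankA
  simp only [hd, htn]
  by_cases hcont : st.contains (n : Int) = true
  · have hled : n < M := by
      have := (PySem.Dict.contains_iff_mem_keys st (n : Int)).mp hcont
      rw [hk, mem_pvRangeInt] at this; omega
    simp only [hcont, if_true]
    obtain ⟨hk2, hm2, hnd2⟩ := pvCombosFold (PySem.List.combinations t (n + 1)) st (n : Int) hcont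
    refine ⟨by rw [hk2, hk]; congr 1; omega, hnd2 hn, ?_⟩
    intro d u
    rw [hm2 d u]
    simp [PySem.List.mem_combinations_iff]
    tauto
  · have hncont : st.contains (n : Int) = false := by
      cases h : st.contains (n : Int) with
      | true => exact absurd h hcont
      | false => rfl
    have hled : ¬ n < M := by
      intro h
      exact hcont ((PySem.Dict.contains_iff_mem_keys st (n : Int)).mpr
        (by rw [hk, mem_pvRangeInt]; omega))
    have hMn : M = n := by omega
    simp only [hncont, Bool.false_eq_true, if_false]
    have hc1 : (st.insert (n : Int) PySem.Set.empty).contains (n : Int) = true :=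
      PySem.Dict.contains_insert_self _ _ _
    have hkeys1 : (st.insert (n : Int) PySem.Set.empty).keys = pvRangeInt (n + 1) := by
      rw [PySem.Dict.keys_insert_of_not_contains _ _ hncont, hk, hMn, pvRangeInt_succ]
    have hB1 : ∀ d', pvB (st.insert (n : Int) PySem.Set.empty) d' = pvB st d' := by
      intro d'
      by_cases h : d' = (n : Int)
      · subst h
        simp [pvB, PySem.Dict.getD_of_not_contains _ _ hncont]
      · simp [pvB, PySem.Dict.getD_insert, h]
    obtain ⟨hk2, hm2, hnd2⟩ := pvCombosFold (PySem.List.combinations t (n + 1)) _ (n : Int) hc1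
    refine ⟨by rw [hk2, hkeys1]; congr 1; omega, ?_, ?_⟩
    · exact hnd2 (fun d' => by rw [hB1 d']; exact hn d')
    · intro d u
      rw [hm2 d u, hB1 d]
      simp [PySem.List.mem_combinations_iff]
      tauto

lemma pvInnerA (t : List Int) : ∀ (n : Nat) (st : PySem.Dict Int (PySem.Set (List Int))) (M : Nat),
    st.keys = pvRangeInt M → (∀ d, (pvB st d).Nodup) →
    (((List.range n).map (fun k : Nat => (k : Int) + 1)).foldl (pvRankA t) st).keys = pvRangeInt (max M n) ∧
    (∀ d, (pvB (((List.range n).map (fun k : Nat => (k : Int) + 1)).foldl (pvRankA t) st) d).Nodup) ∧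
    (∀ d u, u ∈ pvB (((List.range n).map (fun k : Nat => (k : Int) + 1)).foldl (pvRankA t) st) d ↔
      u ∈ pvB st d ∨ (u.Sublist t ∧ 1 ≤ u.length ∧ u.length ≤ n ∧ d = (u.length : Int) - 1)) := by
  intro n
  induction n with
  | zero =>
      intro st M hk hn
      simp only [List.range_zero, List.map_nil, List.foldl_nil]
      refine ⟨by simpa using hk, hn, ?_⟩
      intro d u
      constructor
      · intro h; exact Or.inl h
      · rintro (h | ⟨_, h1, h2, _⟩)
        · exact h
        · omega
  | succ n ih =>
      intro st M hk hn
      rw [List.range_succ, List.map_append, List.foldl_append]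
      obtain ⟨hk1, hn1, hm1⟩ := ih st M hk hn
      simp only [List.map_cons, List.map_nil, List.foldl_cons, List.foldl_nil]
      obtain ⟨hk2, hn2, hm2⟩ :=
        pvRankA_spec t n _ (max M n) (le_max_right _ _) hk1 hn1
      refine ⟨by rw [hk2]; congr 1; omega, hn2, ?_⟩
      intro d u
      rw [hm2 d u, hm1 d u]
      constructor
      · rintro ((h | ⟨hs, h1, h2, hd⟩) | ⟨hs, hl, hd⟩)
        · exact Or.inl h
        · exact Or.inr ⟨hs, h1, by omega, hd⟩
        · refine Or.inr ⟨hs, by omega, by omega, ?_⟩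
          rw [hd, hl]; push_cast; ring
      · rintro (h | ⟨hs, h1, h2, hd⟩)
        · exact Or.inl (Or.inl h)
        · by_cases hle : u.length ≤ n
          · exact Or.inl (Or.inr ⟨hs, h1, hle, hd⟩)
          · have hlen : u.length = n + 1 := by omega
            refine Or.inr ⟨hs, hlen, ?_⟩
            rw [hd, hlen]; push_cast; ring

lemma pvStepA_spec (st : PySem.Dict Int (PySem.Set (List Int))) (s : List Int) (M : Nat)
    (hk : st.keys = pvRangeInt M) (hn : ∀ d, (pvB st d).Nodup) :
    (pvStepA st s).keys = pvRangeInt (max M s.length) ∧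
    (∀ d, (pvB (pvStepA st s) d).Nodup) ∧
    (∀ d u, u ∈ pvB (pvStepA st s) d ↔
      u ∈ pvB st d ∨ (u ≠ [] ∧ d = (u.length : Int) - 1 ∧ u.Sublist (pvNorm s))) := by
  unfold pvStepA
  by_cases h0 : (PySem.List.sorted s (fun x => x) false).length = 0
  · have hs0 : s.length = 0 := by rw [← PySem.List.length_sorted s (fun x => x) false]; exact h0
    have hnil : PySem.List.sorted s (fun x => x) false = [] := List.length_eq_zero_iff.mp h0
    simp only [h0, if_true]
    refine ⟨by rw [hk]; congr 1; omega, hn, ?_⟩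
    intro d u
    constructor
    · intro h; exact Or.inl h
    · rintro (h | ⟨hne, _, hsub⟩)
      · exact h
      · rw [pvNorm, hnil] at hsub
        exact absurd (List.sublist_nil.mp hsub) hne
  · have hL : (PySem.List.sorted s (fun x => x) false).length = s.length :=
      PySem.List.length_sorted s (fun x => x) false
    simp only [h0, if_false]
    rw [pvPyRange_one]
    obtain ⟨hk1, hn1, hm1⟩ := pvInnerA (PySem.List.sorted s (fun x => x) false)
      (PySem.List.sorted s (fun x => x) false).length st M hk hn
    refine ⟨by rw [hk1, hL], hn1, ?_⟩
    intro d u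
    rw [hm1 d u]
    constructor
    · rintro (h | ⟨hs, h1, _, hd⟩)
      · exact Or.inl h
      · exact Or.inr ⟨by intro h; subst h; simp at h1, hd, hs⟩
    · rintro (h | ⟨hne, hd, hs⟩)
      · exact Or.inl h
      · refine Or.inr ⟨hs, ?_, hs.length_le, hd⟩
        cases u with
        | nil => exact absurd rfl hne
        | cons a l => simp

lemma pvFoldA_spec (xs : List (List Int)) : ∀ (st : PySem.Dict Int (PySem.Set (List Int))) (M : Nat),
    st.keys = pvRangeInt M → (∀ d, (pvB st d).Nodup) →
    (xs.foldl pvStepA st).keys = pvRangeInt (pvMaxFrom M xs) ∧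
    (∀ d, (pvB (xs.foldl pvStepA st) d).Nodup) ∧
    (∀ d u, u ∈ pvB (xs.foldl pvStepA st) d ↔ u ∈ pvB st d ∨ pvCl xs d u) := by
  induction xs with
  | nil =>
      intro st M hk hn
      refine ⟨hk, hn, ?_⟩
      intro d u
      simp [pvCl]
  | cons s xs ih =>
      intro st M hk hn
      simp only [List.foldl_cons]
      obtain ⟨hk1, hn1, hm1⟩ := pvStepA_spec st s M hk hn
      obtain ⟨hk2, hn2, hm2⟩ := ih (pvStepA st s) (max M s.length) hk1 hn1
      refine ⟨hk2, hn2, ?_⟩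
      intro d u
      rw [hm2 d u, hm1 d u]
      unfold pvCl
      constructor
      · rintro ((h | ⟨hne, hd, hs⟩) | ⟨hne, hd, t, ht, hsub⟩)
        · exact Or.inl h
        · exact Or.inr ⟨hne, hd, s, by simp, hs⟩
        · exact Or.inr ⟨hne, hd, t, by simp [ht], hsub⟩
      · rintro (h | ⟨hne, hd, t, ht, hsub⟩)
        · exact Or.inl (Or.inl h)
        · rcases List.mem_cons.mp ht with rfl | ht
          · exact Or.inl (Or.inr ⟨hne, hd, hsub⟩)
          · exact Or.inr ⟨hne, hd, t, ht, hsub⟩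

-- ---------- B side ----------
def pvStepB (byDim : PySem.Dict Int (PySem.Set (List Int))) (s : List Int) :
    PySem.Dict Int (PySem.Set (List Int)) :=
  let t := PySem.List.sorted s (fun x => x) false
  if t = [] then byDim
  else
    let d : Int := (t.length : Int) - 1
    let byDim := byDim.setdefault d PySem.Set.empty
    if PySem.Set.contains (byDim.getD d PySem.Set.empty) t then byDim
    else
      let byDim := byDim.modify d PySem.Set.empty (fun b => PySem.Set.add b t)
      if 1 < t.length then pvPeel t byDim else byDim

lemma portB_eq (xs : List (List Int)) :
    all_simplices_by_dim_py_alt xs =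
      (PySem.List.sorted (xs.foldl pvStepB PySem.Dict.empty).keys (fun x => x) false).map
        (fun d => (d, PySem.List.sorted ((xs.foldl pvStepB PySem.Dict.empty).getD d PySem.Set.empty)
          (fun x => x) false)) := rfl

def pvLoopBody (face : List Int) (st : PySem.Dict Int (PySem.Set (List Int))) (i : Nat) :
    PySem.Dict Int (PySem.Set (List Int)) :=
  let sub := face.take i ++ face.drop (i + 1)
  if PySem.Set.contains (st.getD ((face.length : Int) - 2) PySem.Set.empty) sub then st
  else
    let st := st.modify ((face.length : Int) - 2) PySem.Set.empty
      (fun b => PySem.Set.add b sub)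
    if 1 < sub.length then pvPeel sub st else st

lemma pvPeel_eq (face : List Int) (st : PySem.Dict Int (PySem.Set (List Int))) :
    pvPeel face st =
      (List.range face.length).foldl (pvLoopBody face)
        (st.setdefault ((face.length : Int) - 2) PySem.Set.empty) := by
  conv_lhs => rw [pvPeel]
  exact List.foldl_attach (f := pvLoopBody face)

lemma pv_mem_contains {st : PySem.Dict Int (PySem.Set (List Int))} {d : Int} {u : List Int}
    (h : u ∈ pvB st d) : st.contains d = true := by
  cases hc : st.contains d with
  | true => rfl
  | false =>
      rw [pvB, PySem.Dict.getD_of_not_contains _ _ hc] at h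
      simp [PySem.Set.empty] at h

lemma pvSetdefault_B (st : PySem.Dict Int (PySem.Set (List Int))) (k : Int) :
    ∀ d, pvB (st.setdefault k PySem.Set.empty) d = pvB st d := by
  intro d
  cases hc : st.contains k with
  | true => rw [PySem.Dict.setdefault_of_contains _ _ hc]
  | false =>
      rw [PySem.Dict.setdefault_of_not_contains _ _ hc]
      by_cases h : d = k
      · subst h
        simp [pvB, PySem.Dict.getD_of_not_contains _ _ hc]
      · simp [pvB, PySem.Dict.getD_insert, h]

lemma pvSetdefault_keysNodup (st : PySem.Dict Int (PySem.Set (List Int))) (k : Int)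
    (h : st.keys.Nodup) : (st.setdefault k PySem.Set.empty).keys.Nodup := by
  cases hc : st.contains k with
  | true => rw [PySem.Dict.setdefault_of_contains _ _ hc]; exact h
  | false =>
      rw [PySem.Dict.setdefault_of_not_contains _ _ hc]
      exact PySem.Dict.nodup_keys_insert _ _ _ h

lemma pvSetdefault_contains (st : PySem.Dict Int (PySem.Set (List Int))) (k : Int) :
    ∀ d, (st.setdefault k PySem.Set.empty).contains d = true ↔
      (d = k ∨ st.contains d = true) := by
  intro d
  cases hc : st.contains k with
  | true =>
      rw [PySem.Dict.setdefault_of_contains _ _ hc]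
      constructor
      · exact Or.inr
      · rintro (rfl | h)
        · exact hc
        · exact h
  | false =>
      rw [PySem.Dict.setdefault_of_not_contains _ _ hc, PySem.Dict.contains_insert]
      simp

lemma pvWK_congr {st st' : PySem.Dict Int (PySem.Set (List Int))}
    (h : ∀ d, pvB st' d = pvB st d) (hw : pvWK st) : pvWK st' := by
  intro d u hu
  exact hw d u (h d ▸ hu)

lemma pvClosedX_congr {st st' : PySem.Dict Int (PySem.Set (List Int))} {E : List (List Int)}
    (h : ∀ d, pvB st' d = pvB st d) (hc : pvClosedX st E) : pvClosedX st' E := by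
  intro d u hu hE v hv hne
  rw [h]
  exact hc d u (h d ▸ hu) hE v hv hne

lemma pvClosedX_mono {st : PySem.Dict Int (PySem.Set (List Int))} {E E' : List (List Int)}
    (hsub : ∀ e ∈ E, e ∈ E') (h : pvClosedX st E) : pvClosedX st E' := by
  intro d u hu hE v hv hne
  exact h d u hu (fun hmem => hE (hsub u hmem)) v hv hne

def pvPeelSpecP (N : Nat) : Prop :=
  ∀ (face : List Int) (st : PySem.Dict Int (PySem.Set (List Int))) (E : List (List Int)),
    face.length ≤ N → 2 ≤ face.length →
    st.keys.Nodup → (∀ d, (pvB st d).Nodup) → pvWK st →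
    (∀ e ∈ E, face.length ≤ e.length) → pvClosedX st E →
    (∀ d u, u ∈ pvB (pvPeel face st) d ↔ u ∈ pvB st d ∨
        (u ≠ [] ∧ u.Sublist face ∧ u.length < face.length ∧ d = (u.length : Int) - 1)) ∧
    (∀ d, (pvPeel face st).contains d = true ↔
        st.contains d = true ∨ (0 ≤ d ∧ d ≤ (face.length : Int) - 2)) ∧
    (pvPeel face st).keys.Nodup ∧ (∀ d, (pvB (pvPeel face st) d).Nodup) ∧ pvWK (pvPeel face st) ∧
    pvClosedX (pvPeel face st) (E.filter (fun e => e ≠ face))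

lemma pvLoopBody_spec (N : Nat) (IH : pvPeelSpecP N)
    (face : List Int) (E : List (List Int))
    (hN : face.length ≤ N + 1) (h2 : 2 ≤ face.length) (hE : ∀ e ∈ E, face.length ≤ e.length)
    (i : Nat) (hi : i < face.length) (st : PySem.Dict Int (PySem.Set (List Int)))
    (hkn : st.keys.Nodup) (hbn : ∀ d, (pvB st d).Nodup) (hwk : pvWK st)
    (hclX : pvClosedX st (face :: E)) :
    (pvLoopBody face st i).keys.Nodup ∧ (∀ d, (pvB (pvLoopBody face st i) d).Nodup) ∧
    pvWK (pvLoopBody face st i) ∧ pvClosedX (pvLoopBody face st i) (face :: E) ∧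
    (∀ d, st.contains d = true → (pvLoopBody face st i).contains d = true) ∧
    (∀ d, (pvLoopBody face st i).contains d = true →
      st.contains d = true ∨ (0 ≤ d ∧ d ≤ (face.length : Int) - 2)) ∧
    (∀ d u, u ∈ pvB (pvLoopBody face st i) d ↔ u ∈ pvB st d ∨
      (u ≠ [] ∧ u.Sublist (face.eraseIdx i) ∧ d = (u.length : Int) - 1)) := by
  have hsub_eq : face.take i ++ face.drop (i + 1) = face.eraseIdx i :=
    (List.eraseIdx_eq_take_drop_succ face i).symm
  have hslen : (face.eraseIdx i).length = face.length - 1 := by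
    rw [List.length_eraseIdx]; simp [hi]
  have hsne : face.eraseIdx i ≠ [] := by
    intro h
    have := congrArg List.length h
    rw [hslen] at this; simp at this; omega
  have hface_len : face ≠ face.eraseIdx i := by
    intro h
    have := congrArg List.length h
    rw [hslen] at this; omega
  have hd0 : ((face.length : Int) - 2) = ((face.eraseIdx i).length : Int) - 1 := by
    rw [hslen]; omega
  simp only [pvLoopBody, hsub_eq]
  by_cases hmem : face.eraseIdx i ∈ pvB st ((face.length : Int) - 2)
  · have hc : PySem.Set.contains (st.getD ((face.length : Int) - 2) PySem.Set.empty)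
        (face.eraseIdx i) = true := (PySem.Set.contains_iff _ _).mpr hmem
    rw [if_pos hc]
    refine ⟨hkn, hbn, hwk, hclX, fun d h => h, fun d h => Or.inl h, ?_⟩
    intro d u
    constructor
    · exact Or.inl
    · rintro (h | ⟨hne, hsubl, hd⟩)
      · exact h
      · have hnotE : face.eraseIdx i ∉ face :: E := by
          intro hm
          rcases List.mem_cons.mp hm with h' | h'
          · exact hface_len h'.symm
          · have := hE _ h'
            omega
        have := hclX _ _ hmem hnotE u hsubl hne
        rw [hd]; exact this
  · have hc : PySem.Set.contains (st.getD ((face.length : Int) - 2) PySem.Set.empty)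
        (face.eraseIdx i) = false := by
      cases h : PySem.Set.contains (st.getD ((face.length : Int) - 2) PySem.Set.empty)
        (face.eraseIdx i) with
      | true => exact absurd ((PySem.Set.contains_iff _ _).mp h) hmem
      | false => rfl
    rw [hc, if_neg (by simp)]
    set sub := face.eraseIdx i with hsub
    set st₂ := st.modify ((face.length : Int) - 2) PySem.Set.empty
      (fun b => PySem.Set.add b sub) with hst₂
    have hB2 : ∀ d', pvB st₂ d' =
        if d' = (face.length : Int) - 2 then (pvB st ((face.length : Int) - 2)).add sub
        else pvB st d' := by
      intro d'; simp [pvB, hst₂, PySem.Dict.getD_modify]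
    have hmem2 : ∀ d u, u ∈ pvB st₂ d ↔
        u ∈ pvB st d ∨ (d = (face.length : Int) - 2 ∧ u = sub) := by
      intro d u
      rw [hB2 d]
      by_cases h : d = (face.length : Int) - 2
      · subst h; simp [PySem.Set.mem_add]
      · simp [h]
    have hkn2 : st₂.keys.Nodup := by
      rw [hst₂, PySem.Dict.keys_modify]
      exact PySem.Dict.nodup_keys_insert _ _ _ hkn
    have hbn2 : ∀ d, (pvB st₂ d).Nodup := by
      intro d
      rw [hB2 d]
      by_cases h : d = (face.length : Int) - 2
      · rw [if_pos h]; exact PySem.Set.nodup_add _ _ (hbn _)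
      · rw [if_neg h]; exact hbn d
    have hwk2 : pvWK st₂ := by
      intro d u hu
      rcases (hmem2 d u).mp hu with h | ⟨hd, hu'⟩
      · exact hwk d u h
      · subst hu'; exact ⟨hsne, by rw [hd, hd0]⟩
    have hcontmono2 : ∀ d, st.contains d = true → st₂.contains d = true := by
      intro d h
      rw [hst₂, PySem.Dict.contains_modify]
      simp [h]
    have hcontfwd2 : ∀ d, st₂.contains d = true →
        st.contains d = true ∨ d = (face.length : Int) - 2 := by
      intro d h
      rw [hst₂, PySem.Dict.contains_modify] at h
      simp only [Bool.or_eq_true, beq_iff_eq] at h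
      tauto
    have hclX2 : pvClosedX st₂ (sub :: face :: E) := by
      intro d u hu hnotin v hv hvne
      rcases (hmem2 d u).mp hu with h | ⟨hd, hu'⟩
      · have hnotin' : u ∉ face :: E := fun hm => hnotin (List.mem_cons_of_mem _ hm)
        have := hclX d u h hnotin' v hv hvne
        rw [hmem2]
        exact Or.inl this
      · exact absurd (hu' ▸ List.mem_cons_self) hnotin
    by_cases hbig : 1 < sub.length
    · rw [if_pos hbig]
      have hEs : ∀ e ∈ sub :: face :: E, sub.length ≤ e.length := by
        intro e he
        rcases List.mem_cons.mp he with rfl | he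
        · omega
        · rcases List.mem_cons.mp he with rfl | he
          · omega
          · have := hE _ he; omega
      obtain ⟨m3, c3, k3, b3, w3, x3⟩ :=
        IH sub st₂ (sub :: face :: E) (by omega) (by omega) hkn2 hbn2 hwk2 hEs hclX2
      have hfilter : ((sub :: face :: E).filter (fun e => e ≠ sub)) = face :: E := by
        have h1 : ∀ e ∈ E, ¬ e = sub := by
          intro e he h
          have h2l := hE _ he
          have h3l := congrArg List.length h
          omega
        simp only [List.filter_cons, decide_not]
        rw [if_neg (by simp), if_pos (by simp [hface_len])]
        exact congrArg (face :: ·) (List.filter_eq_self.mpr (fun e he => by simp [h1 e he]))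
      rw [hfilter] at x3
      refine ⟨k3, b3, w3, x3, ?_, ?_, ?_⟩
      · intro d h
        exact (c3 d).mpr (Or.inl (hcontmono2 d h))
      · intro d h
        rcases (c3 d).mp h with h | h
        · rcases hcontfwd2 d h with h | h
          · exact Or.inl h
          · exact Or.inr (by omega)
        · right
          constructor
          · omega
          · have : (sub.length : Int) ≤ (face.length : Int) - 1 := by
              rw [hslen]; omega
            omega
      · intro d u
        rw [m3 d u, hmem2 d u]
        constructor
        · rintro ((h | ⟨hd, hu'⟩) | ⟨hne, hsubl, hlen, hd⟩)
          · exact Or.inl h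
          · subst hu'
            exact Or.inr ⟨hsne, List.Sublist.refl _, by rw [hd, hd0]⟩
          · exact Or.inr ⟨hne, hsubl, hd⟩
        · rintro (h | ⟨hne, hsubl, hd⟩)
          · exact Or.inl (Or.inl h)
          · by_cases heq : u.length = sub.length
            · have : u = sub := hsubl.eq_of_length heq
              subst this
              exact Or.inl (Or.inr ⟨by rw [hd, ← hd0], rfl⟩)
            · have hlt : u.length < sub.length :=
                lt_of_le_of_ne hsubl.length_le heq
              exact Or.inr ⟨hne, hsubl, hlt, hd⟩
    · rw [if_neg hbig]
      have hslen1 : sub.length = 1 := by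
        have : 1 ≤ sub.length := by
          cases hs : sub with
          | nil => exact absurd hs hsne
          | cons a l => simp
        omega
      have hsingle : ∀ v, v.Sublist sub → v ≠ [] → v = sub := by
        intro v hv hvne
        obtain ⟨a, ha⟩ := List.length_eq_one_iff.mp hslen1
        rw [ha] at hv ⊢
        exact pv_sublist_singleton hv hvne
      refine ⟨hkn2, hbn2, hwk2, ?_, hcontmono2, ?_, ?_⟩
      · intro d u hu hnotin v hv hvne
        rcases (hmem2 d u).mp hu with h | ⟨hd, hu'⟩
        · have hnotin' : u ∉ face :: E := hnotin
          have := hclX d u h hnotin' v hv hvne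
          rw [hmem2]
          exact Or.inl this
        · subst hu'
          have := hsingle v hv hvne
          subst this
          rw [hmem2]
          exact Or.inr ⟨by rw [← hd0], rfl⟩
      · intro d h
        rcases hcontfwd2 d h with h | h
        · exact Or.inl h
        · exact Or.inr (by omega)
      · intro d u
        rw [hmem2 d u]
        constructor
        · rintro (h | ⟨hd, hu'⟩)
          · exact Or.inl h
          · subst hu'
            exact Or.inr ⟨hsne, List.Sublist.refl _, by rw [hd, hd0]⟩
        · rintro (h | ⟨hne, hsubl, hd⟩)
          · exact Or.inl h
          · have := hsingle u hsubl hne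
            subst this
            exact Or.inr ⟨by rw [hd, ← hd0], rfl⟩

lemma pvPeelLoop_spec (N : Nat) (IH : pvPeelSpecP N)
    (face : List Int) (E : List (List Int))
    (hN : face.length ≤ N + 1) (h2 : 2 ≤ face.length) (hE : ∀ e ∈ E, face.length ≤ e.length) :
    ∀ (is : List Nat) (st : PySem.Dict Int (PySem.Set (List Int))),
    (∀ i ∈ is, i < face.length) →
    st.keys.Nodup → (∀ d, (pvB st d).Nodup) → pvWK st →
    pvClosedX st (face :: E) →
    ((is.foldl (pvLoopBody face) st).keys.Nodup) ∧
    (∀ d, (pvB (is.foldl (pvLoopBody face) st) d).Nodup) ∧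
    pvWK (is.foldl (pvLoopBody face) st) ∧
    pvClosedX (is.foldl (pvLoopBody face) st) (face :: E) ∧
    (∀ d, st.contains d = true → (is.foldl (pvLoopBody face) st).contains d = true) ∧
    (∀ d, (is.foldl (pvLoopBody face) st).contains d = true →
      st.contains d = true ∨ (0 ≤ d ∧ d ≤ (face.length : Int) - 2)) ∧
    (∀ d u, u ∈ pvB (is.foldl (pvLoopBody face) st) d ↔ u ∈ pvB st d ∨
      ∃ j ∈ is, (u ≠ [] ∧ u.Sublist (face.eraseIdx j) ∧ d = (u.length : Int) - 1)) := by
  intro is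
  induction is with
  | nil =>
      intro st _ hkn hbn hwk hclX
      exact ⟨hkn, hbn, hwk, hclX, fun d h => h, fun d h => Or.inl h, by intro d u; simp⟩
  | cons i is ih =>
      intro st hbound hkn hbn hwk hclX
      simp only [List.foldl_cons]
      have hi : i < face.length := hbound i (by simp)
      obtain ⟨k1, b1, w1, x1, cm1, cf1, m1⟩ :=
        pvLoopBody_spec N IH face E hN h2 hE i hi st hkn hbn hwk hclX
      obtain ⟨k2, b2, w2, x2, cm2, cf2, m2⟩ :=
        ih (pvLoopBody face st i) (fun j hj => hbound j (by simp [hj])) k1 b1 w1 x1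
      refine ⟨k2, b2, w2, x2, ?_, ?_, ?_⟩
      · intro d h
        exact cm2 d (cm1 d h)
      · intro d h
        rcases cf2 d h with h | h
        · exact cf1 d h
        · exact Or.inr h
      · intro d u
        rw [m2 d u, m1 d u]
        constructor
        · rintro ((h | ⟨hne, hs, hd⟩) | ⟨j, hj, hne, hs, hd⟩)
          · exact Or.inl h
          · exact Or.inr ⟨i, by simp, hne, hs, hd⟩
          · exact Or.inr ⟨j, by simp [hj], hne, hs, hd⟩
        · rintro (h | ⟨j, hj, hne, hs, hd⟩)
          · exact Or.inl (Or.inl h)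
          · rcases List.mem_cons.mp hj with rfl | hj
            · exact Or.inl (Or.inr ⟨hne, hs, hd⟩)
            · exact Or.inr ⟨j, hj, hne, hs, hd⟩

lemma pvPeel_spec : ∀ (N : Nat), pvPeelSpecP N := by
  intro N
  induction N with
  | zero =>
      intro face st E hN h2
      omega
  | succ N ihN =>
      intro face st E hN h2 hkn hbn hwk hE hclX
      rw [pvPeel_eq]
      set d₀ : Int := (face.length : Int) - 2 with hd₀
      have hB0 := pvSetdefault_B st d₀
      have hkn0 := pvSetdefault_keysNodup st d₀ hkn
      have hcont0 := pvSetdefault_contains st d₀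
      have hbn0 : ∀ d, (pvB (st.setdefault d₀ PySem.Set.empty) d).Nodup := by
        intro d; rw [hB0 d]; exact hbn d
      have hwk0 : pvWK (st.setdefault d₀ PySem.Set.empty) := pvWK_congr hB0 hwk
      have hclX0 : pvClosedX (st.setdefault d₀ PySem.Set.empty) (face :: E) :=
        pvClosedX_congr hB0 (pvClosedX_mono (fun e he => List.mem_cons_of_mem _ he) hclX)
      obtain ⟨k1, b1, w1, x1, cm1, cf1, m1⟩ :=
        pvPeelLoop_spec N ihN face E hN h2 hE (List.range face.length)
          (st.setdefault d₀ PySem.Set.empty) (fun i hi => List.mem_range.mp hi)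
          hkn0 hbn0 hwk0 hclX0
      have hmemFinal : ∀ d u, u ∈ pvB ((List.range face.length).foldl (pvLoopBody face)
          (st.setdefault d₀ PySem.Set.empty)) d ↔ u ∈ pvB st d ∨
          (u ≠ [] ∧ u.Sublist face ∧ u.length < face.length ∧ d = (u.length : Int) - 1) := by
        intro d u
        rw [m1 d u, hB0 d]
        constructor
        · rintro (h | ⟨j, hj, hne, hs, hd⟩)
          · exact Or.inl h
          · have hjlen : (face.eraseIdx j).length = face.length - 1 := by
              rw [List.length_eraseIdx]
              simp [List.mem_range.mp hj]
            refine Or.inr ⟨hne, hs.trans (List.eraseIdx_sublist face j), ?_, hd⟩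
            have := hs.length_le
            omega
        · rintro (h | ⟨hne, hs, hlen, hd⟩)
          · exact Or.inl h
          · obtain ⟨j, hj, hs'⟩ := pv_sublist_eraseIdx hs hlen
            exact Or.inr ⟨j, List.mem_range.mpr hj, hne, hs', hd⟩
      refine ⟨hmemFinal, ?_, k1, b1, w1, ?_⟩
      · intro d
        constructor
        · intro h
          rcases cf1 d h with h | h
          · rcases (hcont0 d).mp h with rfl | h
            · exact Or.inr (by omega)
            · exact Or.inl h
          · exact Or.inr h
        · rintro (h | ⟨hge, hle⟩)
          · exact cm1 d ((hcont0 d).mpr (Or.inr h))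
          · by_cases hdeq : d = d₀
            · exact cm1 d ((hcont0 d).mpr (Or.inl hdeq))
            · have hdlt : d < (face.length : Int) - 2 := by
                rw [hd₀] at hdeq
                omega
              -- witness: a nonempty sublist of face of length d+1 < face.length
              have h0lt : 0 < face.length := by omega
              have hwit : (face.eraseIdx 0).take (d.toNat + 1) ∈
                  pvB ((List.range face.length).foldl (pvLoopBody face)
                    (st.setdefault d₀ PySem.Set.empty)) d := by
                rw [hmemFinal]
                have hjlen : (face.eraseIdx 0).length = face.length - 1 := by
                  rw [List.length_eraseIdx]; simp [h0lt]
                have htlen : ((face.eraseIdx 0).take (d.toNat + 1)).length = d.toNat + 1 := by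
                  rw [List.length_take]
                  omega
                refine Or.inr ⟨?_, ?_, ?_, ?_⟩
                · intro h
                  have := congrArg List.length h
                  rw [htlen] at this
                  simp at this
                · exact (List.take_sublist _ _).trans (List.eraseIdx_sublist face 0)
                · omega
                · rw [htlen]; omega
              exact pv_mem_contains hwit
      · intro d u hu hnotin v hv hvne
        by_cases hufc : u = face
        · subst hufc
          rcases Decidable.em (v = u) with rfl | hvneq
          · have hd : d = (v.length : Int) - 1 := (w1 d v hu).2
            rw [← hd]; exact hu
          · have hvlt : v.length < u.length := by
              have hle := hv.length_le
              rcases Nat.lt_or_ge v.length u.length with h | h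
              · exact h
              · exact absurd (hv.eq_of_length (by omega)) hvneq
            rw [hmemFinal]
            exact Or.inr ⟨hvne, hv, hvlt, rfl⟩
        · have hunotE : u ∉ face :: E := by
            intro hm
            rcases List.mem_cons.mp hm with h' | h'
            · exact hufc h'
            · exact hnotin (List.mem_filter.mpr ⟨h', by simp [hufc]⟩)
          exact x1 d u hu hunotE v hv hvne
lemma pvStepB_spec (st : PySem.Dict Int (PySem.Set (List Int))) (s : List Int)
    (hk : st.keys.Nodup) (hn : ∀ d, (pvB st d).Nodup) (hwk : pvWK st) (hcl : pvClosedX st []) :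
    (pvStepB st s).keys.Nodup ∧ (∀ d, (pvB (pvStepB st s) d).Nodup) ∧ pvWK (pvStepB st s) ∧
    pvClosedX (pvStepB st s) [] ∧
    (∀ d u, u ∈ pvB (pvStepB st s) d ↔
      u ∈ pvB st d ∨ (u ≠ [] ∧ d = (u.length : Int) - 1 ∧ u.Sublist (pvNorm s))) ∧
    (∀ d, (pvStepB st s).contains d = true ↔
      st.contains d = true ∨ (0 ≤ d ∧ d ≤ (s.length : Int) - 1)) := by
  unfold pvStepB
  by_cases h0 : PySem.List.sorted s (fun x => x) false = []
  · rw [if_pos h0]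
    refine ⟨hk, hn, hwk, hcl, ?_, ?_⟩
    · intro d u
      constructor
      · exact Or.inl
      · rintro (h | ⟨hne, _, hsub⟩)
        · exact h
        · rw [pvNorm, h0] at hsub
          exact absurd (List.sublist_nil.mp hsub) hne
    · intro d
      have hs0 : s = [] := (PySem.List.sorted_eq_nil_iff s (fun x => x) false).mp h0
      constructor
      · exact fun h => Or.inl h
      · rintro (h | ⟨h1, h2⟩)
        · exact h
        · rw [hs0] at h2
          simp at h2
          omega
  · simp only [if_neg h0]
    have hL : (PySem.List.sorted s (fun x => x) false).length = s.length :=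
      PySem.List.length_sorted s (fun x => x) false
    set t := PySem.List.sorted s (fun x => x) false with ht
    have hLpos : 1 ≤ t.length := by
      cases htt : t with
      | nil => exact absurd htt h0
      | cons a l => simp
    set d₁ : Int := (t.length : Int) - 1 with hd₁
    have hB0 := pvSetdefault_B st d₁
    have hkn0 := pvSetdefault_keysNodup st d₁ hk
    have hcont0 := pvSetdefault_contains st d₁
    set st₀ := st.setdefault d₁ PySem.Set.empty with hst₀
    have hbn0 : ∀ d, (pvB st₀ d).Nodup := fun d => by rw [hB0 d]; exact hn d
    have hwk0 := pvWK_congr hB0 hwk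
    by_cases hmem : t ∈ pvB st₀ d₁
    · have hc : PySem.Set.contains (st₀.getD d₁ PySem.Set.empty) t = true :=
        (PySem.Set.contains_iff _ _).mpr hmem
      rw [if_pos hc]
      have hmemst : t ∈ pvB st d₁ := by rw [← hB0 d₁]; exact hmem
      refine ⟨hkn0, hbn0, hwk0, pvClosedX_congr hB0 hcl, ?_, ?_⟩
      · intro d u
        rw [hB0 d]
        constructor
        · exact Or.inl
        · rintro (h | ⟨hne, hd, hsub⟩)
          · exact h
          · have := hcl d₁ t hmemst (by simp) u hsub hne
            rw [hd]; exact this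
      · intro d
        constructor
        · intro h
          rcases (hcont0 d).mp h with rfl | h
          · refine Or.inr ⟨by omega, by rw [hd₁, hL]⟩
          · exact Or.inl h
        · rintro (h | ⟨h1, h2⟩)
          · exact (hcont0 d).mpr (Or.inr h)
          · by_cases hq : d = d₁
            · exact (hcont0 d).mpr (Or.inl hq)
            · refine (hcont0 d).mpr (Or.inr (pv_mem_contains (d := d) (u := t.take (d.toNat + 1)) ?_))
              have htl : (t.take (d.toNat + 1)).length = d.toNat + 1 := by
                rw [List.length_take]
                rw [hL] at hd₁ ⊢
                omega
              have hne : t.take (d.toNat + 1) ≠ [] := by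
                intro h
                have := congrArg List.length h
                rw [htl] at this
                simp at this
              have := hcl d₁ t hmemst (by simp) (t.take (d.toNat + 1)) (List.take_sublist _ _) hne
              rw [htl] at this
              have hdd : ((d.toNat + 1 : Nat) : Int) - 1 = d := by omega
              rw [hdd] at this
              exact this
    · have hc : PySem.Set.contains (st₀.getD d₁ PySem.Set.empty) t = false := by
        cases h : PySem.Set.contains (st₀.getD d₁ PySem.Set.empty) t with
        | true => exact absurd ((PySem.Set.contains_iff _ _).mp h) hmem
        | false => rfl
      rw [hc, if_neg (by simp)]
      have hmemstF : t ∉ pvB st d₁ := by rw [← hB0 d₁]; exact hmem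
      set st₂ := st₀.modify d₁ PySem.Set.empty (fun b => PySem.Set.add b t) with hst₂
      have hB2 : ∀ d', pvB st₂ d' =
          if d' = d₁ then (pvB st d₁).add t else pvB st d' := by
        intro d'
        rw [hst₂]
        have hmod : pvB (st₀.modify d₁ PySem.Set.empty fun b => b.add t) d' =
            if d' = d₁ then (pvB st₀ d₁).add t else pvB st₀ d' := by
          simp [pvB, PySem.Dict.getD_modify]
        rw [hmod, hB0 d₁, hB0 d']
      have hmem2 : ∀ d u, u ∈ pvB st₂ d ↔ u ∈ pvB st d ∨ (d = d₁ ∧ u = t) := by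
        intro d u
        rw [hB2 d]
        by_cases h : d = d₁
        · subst h; simp [PySem.Set.mem_add]
        · simp [h]
      have hkn2 : st₂.keys.Nodup := by
        rw [hst₂, PySem.Dict.keys_modify]
        exact PySem.Dict.nodup_keys_insert _ _ _ hkn0
      have hbn2 : ∀ d, (pvB st₂ d).Nodup := by
        intro d
        rw [hB2 d]
        by_cases h : d = d₁
        · rw [if_pos h]; exact PySem.Set.nodup_add _ _ (hn _)
        · rw [if_neg h]; exact hn d
      have hwk2 : pvWK st₂ := by
        intro d u hu
        rcases (hmem2 d u).mp hu with h | ⟨hd, hu'⟩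
        · exact hwk d u h
        · subst hu'; exact ⟨h0, by rw [hd, hd₁]⟩
      have hcontmono2 : ∀ d, st.contains d = true → st₂.contains d = true := by
        intro d h
        rw [hst₂, PySem.Dict.contains_modify]
        simp [(hcont0 d).mpr (Or.inr h)]
      have hcontfwd2 : ∀ d, st₂.contains d = true → st.contains d = true ∨ d = d₁ := by
        intro d h
        rw [hst₂, PySem.Dict.contains_modify] at h
        simp only [Bool.or_eq_true, beq_iff_eq] at h
        rcases h with h | h
        · exact Or.inr h
        · rcases (hcont0 d).mp h with h | h
          · exact Or.inr h
          · exact Or.inl h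
      have hclX2 : pvClosedX st₂ [t] := by
        intro d u hu hnotin v hv hvne
        rcases (hmem2 d u).mp hu with h | ⟨hd, hu'⟩
        · have := hcl d u h (by simp) v hv hvne
          rw [hmem2]
          exact Or.inl this
        · exact absurd (by simp [hu']) hnotin
      by_cases hbig : 1 < t.length
      · rw [if_pos hbig]
        obtain ⟨m3, c3, k3, b3, w3, x3⟩ :=
          pvPeel_spec t.length t st₂ [t] (le_refl _) (by omega) hkn2 hbn2 hwk2
            (by intro e he; rcases List.mem_singleton.mp he with rfl; omega) hclX2
        have hfilter : ([t].filter (fun e => e ≠ t)) = ([] : List (List Int)) := by simp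
        rw [hfilter] at x3
        refine ⟨k3, b3, w3, x3, ?_, ?_⟩
        · intro d u
          rw [m3 d u, hmem2 d u]
          constructor
          · rintro ((h | ⟨hd, hu'⟩) | ⟨hne, hsubl, hlen, hd⟩)
            · exact Or.inl h
            · subst hu'
              exact Or.inr ⟨h0, by rw [hd, hd₁], List.Sublist.refl _⟩
            · exact Or.inr ⟨hne, hd, hsubl⟩
          · rintro (h | ⟨hne, hd, hsubl⟩)
            · exact Or.inl (Or.inl h)
            · by_cases heq : u.length = t.length
              · have : u = t := hsubl.eq_of_length heq
                subst this
                exact Or.inl (Or.inr ⟨by rw [hd, hd₁], rfl⟩)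
              · have hlt : u.length < t.length := lt_of_le_of_ne hsubl.length_le heq
                exact Or.inr ⟨hne, hsubl, hlt, hd⟩
        · intro d
          constructor
          · intro h
            rcases (c3 d).mp h with h | h
            · rcases hcontfwd2 d h with h | h
              · exact Or.inl h
              · exact Or.inr ⟨by omega, by omega⟩
            · exact Or.inr ⟨by omega, by rw [← hL]; omega⟩
          · rintro (h | ⟨h1, h2⟩)
            · exact (c3 d).mpr (Or.inl (hcontmono2 d h))
            · rw [← hL] at h2
              by_cases hq : d = d₁
              · exact (c3 d).mpr (Or.inl (by rw [hst₂, PySem.Dict.contains_modify]; simp [hq]))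
              · exact (c3 d).mpr (Or.inr ⟨h1, by omega⟩)
      · rw [if_neg hbig]
        have hlen1 : t.length = 1 := by omega
        have hsingle : ∀ v, v.Sublist t → v ≠ [] → v = t := by
          intro v hv hvne
          obtain ⟨a, ha⟩ := List.length_eq_one_iff.mp hlen1
          rw [ha] at hv ⊢
          exact pv_sublist_singleton hv hvne
        refine ⟨hkn2, hbn2, hwk2, ?_, ?_, ?_⟩
        · intro d u hu hnotin v hv hvne
          rcases (hmem2 d u).mp hu with h | ⟨hd, hu'⟩
          · have := hcl d u h (by simp) v hv hvne
            rw [hmem2]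
            exact Or.inl this
          · subst hu'
            have := hsingle v hv hvne
            subst this
            rw [hmem2]
            exact Or.inr ⟨by rw [hd₁, hlen1], rfl⟩
        · intro d u
          rw [hmem2 d u]
          constructor
          · rintro (h | ⟨hd, hu'⟩)
            · exact Or.inl h
            · subst hu'
              exact Or.inr ⟨h0, by rw [hd, hd₁], List.Sublist.refl _⟩
          · rintro (h | ⟨hne, hd, hsubl⟩)
            · exact Or.inl h
            · have := hsingle u hsubl hne
              subst this
              exact Or.inr ⟨by rw [hd, hd₁], rfl⟩
        · intro d
          constructor
          · intro h
            rcases hcontfwd2 d h with h | h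
            · exact Or.inl h
            · exact Or.inr ⟨by omega, by rw [← hL]; omega⟩
          · rintro (h | ⟨h1, h2⟩)
            · exact hcontmono2 d h
            · rw [← hL] at h2
              have : d = d₁ := by omega
              rw [hst₂, PySem.Dict.contains_modify]
              simp [this]

lemma pvFoldB_spec (xs : List (List Int)) : ∀ (st : PySem.Dict Int (PySem.Set (List Int))),
    st.keys.Nodup → (∀ d, (pvB st d).Nodup) → pvWK st → pvClosedX st [] →
    (xs.foldl pvStepB st).keys.Nodup ∧ (∀ d, (pvB (xs.foldl pvStepB st) d).Nodup) ∧
    (∀ d u, u ∈ pvB (xs.foldl pvStepB st) d ↔ u ∈ pvB st d ∨ pvCl xs d u) ∧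
    (∀ d, (xs.foldl pvStepB st).contains d = true ↔
      st.contains d = true ∨ ∃ s ∈ xs, 0 ≤ d ∧ d ≤ (s.length : Int) - 1) := by
  induction xs with
  | nil =>
      intro st hk hn hwk hcl
      refine ⟨hk, hn, ?_, ?_⟩
      · intro d u; simp [pvCl]
      · intro d; simp
  | cons s xs ih =>
      intro st hk hn hwk hcl
      simp only [List.foldl_cons]
      obtain ⟨hk1, hn1, hwk1, hcl1, hm1, hc1⟩ := pvStepB_spec st s hk hn hwk hcl
      obtain ⟨hk2, hn2, hm2, hc2⟩ := ih (pvStepB st s) hk1 hn1 hwk1 hcl1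
      refine ⟨hk2, hn2, ?_, ?_⟩
      · intro d u
        rw [hm2 d u, hm1 d u]
        unfold pvCl
        constructor
        · rintro ((h | ⟨hne, hd, hs⟩) | ⟨hne, hd, w, hw, hsub⟩)
          · exact Or.inl h
          · exact Or.inr ⟨hne, hd, s, by simp, hs⟩
          · exact Or.inr ⟨hne, hd, w, by simp [hw], hsub⟩
        · rintro (h | ⟨hne, hd, w, hw, hsub⟩)
          · exact Or.inl (Or.inl h)
          · rcases List.mem_cons.mp hw with rfl | hw
            · exact Or.inl (Or.inr ⟨hne, hd, hsub⟩)
            · exact Or.inr ⟨hne, hd, w, hw, hsub⟩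
      · intro d
        rw [hc2 d, hc1 d]
        constructor
        · rintro ((h | h) | ⟨w, hw, hww⟩)
          · exact Or.inl h
          · exact Or.inr ⟨s, by simp, h⟩
          · exact Or.inr ⟨w, by simp [hw], hww⟩
        · rintro (h | ⟨w, hw, hww⟩)
          · exact Or.inl (Or.inl h)
          · rcases List.mem_cons.mp hw with rfl | hw
            · exact Or.inl (Or.inr hww)
            · exact Or.inr ⟨w, hw, hww⟩

-- ===== VERDICT (by name: the statement is the Claim_ definition above) =====
theorem all_simplices_by_dim_py_spec : Claim_equal_all_simplices_by_dim_py := by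
  intro xs _
  unfold Spec_all_simplices_by_dim_py
  rw [portA_eq, portB_eq]
  obtain ⟨hkA, hnA, hmA⟩ := pvFoldA_spec xs PySem.Dict.empty 0
    (by simp [pvRangeInt, PySem.Dict.keys_empty])
    (by intro d; simp [pvB, PySem.Dict.getD_empty, PySem.Set.empty])
  obtain ⟨hkB, hnB, hmB, hcB⟩ := pvFoldB_spec xs PySem.Dict.empty
    (by rw [PySem.Dict.keys_empty]; exact List.nodup_nil)
    (by intro d; simp [pvB, PySem.Dict.getD_empty, PySem.Set.empty])
    (by intro d u h; simp [pvB, PySem.Dict.getD_empty, PySem.Set.empty] at h)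
    (by intro d u h; simp [pvB, PySem.Dict.getD_empty, PySem.Set.empty] at h)
  have hmA' : ∀ d u, u ∈ pvB (xs.foldl pvStepA PySem.Dict.empty) d ↔ pvCl xs d u := by
    intro d u
    rw [hmA d u]
    simp [pvB, PySem.Dict.getD_empty, PySem.Set.empty]
  have hmB' : ∀ d u, u ∈ pvB (xs.foldl pvStepB PySem.Dict.empty) d ↔ pvCl xs d u := by
    intro d u
    rw [hmB d u]
    simp [pvB, PySem.Dict.getD_empty, PySem.Set.empty]
  have hMiff : ∀ a : Int, (∃ s ∈ xs, 0 ≤ a ∧ a ≤ (s.length : Int) - 1) ↔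
      (0 ≤ a ∧ a < (pvMaxFrom 0 xs : Int)) := by
    intro a
    constructor
    · rintro ⟨s, hs, h1, h2⟩
      refine ⟨h1, ?_⟩
      have hlt : a.toNat < s.length := by omega
      have := (pv_lt_maxFrom xs 0 a.toNat).mpr (Or.inr ⟨s, hs, hlt⟩)
      omega
    · rintro ⟨h1, h2⟩
      have hlt : a.toNat < pvMaxFrom 0 xs := by omega
      rcases (pv_lt_maxFrom xs 0 a.toNat).mp hlt with h | ⟨s, hs, h⟩
      · omega
      · exact ⟨s, hs, h1, by omega⟩
  have hkeysB_sorted : PySem.List.sorted (xs.foldl pvStepB PySem.Dict.empty).keys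
      (fun x => x) false = pvRangeInt (pvMaxFrom 0 xs) := by
    apply PySem.List.sorted_eq_of_perm_of_pairwise_lt
    · refine (List.perm_ext_iff_of_nodup (nodup_pvRangeInt _) hkB).mpr ?_
      intro a
      rw [mem_pvRangeInt]
      rw [← PySem.Dict.contains_iff_mem_keys, hcB a]
      rw [← hMiff a]
      simp [PySem.Dict.contains_empty]
    · exact pairwise_pvRangeInt _
  rw [PySem.Dict.items_eq_map_keys _ (hkA ▸ nodup_pvRangeInt (pvMaxFrom 0 xs)) PySem.Set.empty,
    hkA, hkeysB_sorted, List.map_map]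
  apply List.map_congr_left
  intro d _
  simp only [Function.comp]
  refine congrArg (fun l => (d, l)) ?_
  have hperm : ((xs.foldl pvStepA PySem.Dict.empty).getD d PySem.Set.empty).Perm
      ((xs.foldl pvStepB PySem.Dict.empty).getD d PySem.Set.empty) := by
    refine (List.perm_ext_iff_of_nodup (hnA d) (hnB d)).mpr ?_
    intro u
    rw [hmA' d u, hmB' d u]
  convert PySem.List.sorted_eq_sorted_of_perm _ _ (fun x => x) (fun a b h => h) hperm using 2
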